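-- pv_equiv track=rewrite | github.com/Twenkid/CogAlg | frame_dblobs_debug.py | lateral_comp
-- ===== SOURCE A (Python) =====
-- from collections import deque
--
-- def lateral_comp(pixel_):  # comparison over x coordinate: between min_rng of consecutive pixels within each line
--
--     ders_ = []  # tuples of complete derivatives: summation range = rng
--     rng_ders_ = deque(maxlen=rng)  # array of tuples within rng of current pixel: summation range < rng
--     max_index = rng - 1  # max index of rng_ders_
--     pri_d, pri_m = 0, 0  # fuzzy derivatives in prior completed tuple
--
--     for p in pixel_:  # pixel p is compared to rng of prior pixels within horizontal line, summing d and m per prior pixel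
--         for index, (pri_p, d, m) in enumerate(rng_ders_):
--
--             d += p - pri_p  # fuzzy d: running sum of differences between pixel and all subsequent pixels within rng
--             m += min(p, pri_p)  # fuzzy m: running sum of matches between pixel and all subsequent pixels within rng
--
--             if index < max_index:
--                 rng_ders_[index] = (pri_p, d, m)
--             else:
--                 ders_.append(
--                     (pri_p, d + pri_d, m + pri_m))  # completed bilateral tuple is transferred from rng_ders_ to ders_
--                 pri_d = d;
--                 pri_m = m  # to complement derivatives of next rng_t_: derived from next rng of pixels
--
--         rng_ders_.appendleft(
--             (p, 0, 0))  # new tuple with initialized d and m, maxlen displaces completed tuple from rng_t_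
--
--     ders_ += reversed(rng_ders_)  # or tuples of last rng (incomplete, in reverse order) are discarded?
--     return ders_
--
-- rng = 2  # number of leftward and upward pixels compared to each input pixel
-- ===== SOURCE B (Python) =====
-- def lateral_comp(pixel_):  # direct index pass: each output tuple computed from its window, no deque/carry state
--     p = pixel_
--     n = len(p)
--     if n == 0:
--         return []
--     if n == 1:
--         return [(p[0], 0, 0)]
--     out = []
--     for i in range(n - 2):
--         d = (p[i + 1] - p[i]) + (p[i + 2] - p[i])
--         m = min(p[i + 1], p[i]) + min(p[i + 2], p[i])
--         if i >= 1:
--             d += (p[i] - p[i - 1]) + (p[i + 1] - p[i - 1])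
--             m += min(p[i], p[i - 1]) + min(p[i + 1], p[i - 1])
--         out.append((p[i], d, m))
--     out.append((p[n - 2], p[n - 1] - p[n - 2], min(p[n - 1], p[n - 2])))
--     out.append((p[n - 1], 0, 0))
--     return out
-- ===== Notes on version B (the rewrite author's own statement) =====
-- stated objective: simpler
-- what changed: Replaced the deque with in-place updates, inner enumerate loop and pri_d/pri_m carry state by a single stateless index pass that computes each output tuple directly from its four-pixel window, with the two incomplete tail tuples appended explicitly.
import Mathlib
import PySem

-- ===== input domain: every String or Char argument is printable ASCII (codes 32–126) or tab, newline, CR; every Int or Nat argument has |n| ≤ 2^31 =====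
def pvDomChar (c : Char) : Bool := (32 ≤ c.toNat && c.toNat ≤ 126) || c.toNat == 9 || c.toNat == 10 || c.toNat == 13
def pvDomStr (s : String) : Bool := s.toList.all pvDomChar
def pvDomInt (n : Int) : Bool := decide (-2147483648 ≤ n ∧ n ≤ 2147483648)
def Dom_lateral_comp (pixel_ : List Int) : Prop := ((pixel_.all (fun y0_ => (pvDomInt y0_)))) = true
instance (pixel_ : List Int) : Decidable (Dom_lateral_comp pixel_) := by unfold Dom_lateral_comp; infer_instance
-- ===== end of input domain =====

-- B replaces A's deque + carry-state scheme by a stateless index pass computing each tuple from its window (objective: simpler).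

-- ===== PORT A =====
-- one iteration of A's outer `for p in pixel_` loop; the inner `for index, (pri_p, d, m) in enumerate(rng_ders_)`
-- is a fold that rebuilds the deque (in-place indexed update when index < max_index, old value kept otherwise),
-- and `appendleft` with maxlen=rng(=2) is modelled by consing and taking 2.
def lcStep (st : List (Int × Int × Int) × List (Int × Int × Int) × Int × Int) (p : Int) :
    List (Int × Int × Int) × List (Int × Int × Int) × Int × Int :=
  let inner := (PySem.List.enumerate st.2.1).foldl
    (fun st2 ie =>
      let d := ie.2.2.1 + (p - ie.2.1)
      let m := ie.2.2.2 + min p ie.2.1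
      if ie.1 < (1 : Int) then
        (st2.1, st2.2.1 ++ [(ie.2.1, d, m)], st2.2.2.1, st2.2.2.2)
      else
        (st2.1 ++ [(ie.2.1, d + st2.2.2.1, m + st2.2.2.2)], st2.2.1 ++ [(ie.2.1, ie.2.2.1, ie.2.2.2)], d, m))
    (st.1, ([] : List (Int × Int × Int)), st.2.2.1, st.2.2.2)
  (inner.1, ((p, 0, 0) :: inner.2.1).take 2, inner.2.2.1, inner.2.2.2)

def lateral_comp (pixel_ : List Int) : List (Int × Int × Int) :=
  let fin := pixel_.foldl lcStep ([], [], 0, 0)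
  fin.1 ++ fin.2.1.reverse

-- ===== PORT B =====
def lateral_comp_alt (pixel_ : List Int) : List (Int × Int × Int) :=
  let p := pixel_
  let n := p.length
  if n = 0 then []
  else if n = 1 then [(p.getD 0 0, 0, 0)]
  else
    let body := (List.range (n - 2)).map (fun i =>
      let pi := p.getD i 0
      let d := (p.getD (i+1) 0 - pi) + (p.getD (i+2) 0 - pi)
      let m := min (p.getD (i+1) 0) pi + min (p.getD (i+2) 0) pi
      if 1 ≤ i then
        (pi, d + ((pi - p.getD (i-1) 0) + (p.getD (i+1) 0 - p.getD (i-1) 0)),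
             m + (min pi (p.getD (i-1) 0) + min (p.getD (i+1) 0) (p.getD (i-1) 0)))
      else (pi, d, m))
    body ++ [(p.getD (n-2) 0, p.getD (n-1) 0 - p.getD (n-2) 0, min (p.getD (n-1) 0) (p.getD (n-2) 0)),
             (p.getD (n-1) 0, 0, 0)]

-- ===== PRECONDITION & SPEC =====
def Spec_lateral_comp (pixel_ : List Int) (out : List (Int × Int × Int)) : Prop := out = lateral_comp_alt pixel_
instance (pixel_ : List Int) (out : List (Int × Int × Int)) : Decidable (Spec_lateral_comp pixel_ out) := by unfold Spec_lateral_comp; infer_instance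

-- ===== CLAIM (what is proved, stated in full; the proofs are below) =====
def Claim_equal_lateral_comp : Prop := ∀ (pixel_ : List Int), Dom_lateral_comp pixel_ → Spec_lateral_comp pixel_ (lateral_comp pixel_)

-- ===== LEMMAS AND PROOFS =====

-- closed recursive description of the full output for inputs a :: b :: rest, with carry (pd, pm)
def chainFull (a b pd pm : Int) : List Int → List (Int × Int × Int)
  | [] => [(a, b - a, min b a), (b, 0, 0)]
  | c :: rest =>
      (a, (b - a) + (c - a) + pd, min b a + min c a + pm) ::
        chainFull b c ((b - a) + (c - a)) (min b a + min c a) rest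

lemma A_loop (rest : List Int) : ∀ (ders : List (Int × Int × Int)) (a b pd pm : Int),
    (let fin := rest.foldl lcStep (ders, [(b, 0, 0), (a, b - a, min b a)], pd, pm)
     fin.1 ++ fin.2.1.reverse) = ders ++ chainFull a b pd pm rest := by
  induction rest with
  | nil => intro ders a b pd pm; simp [chainFull]
  | cons c rest ih =>
      intro ders a b pd pm
      have h := ih (ders ++ [(a, (b - a) + (c - a) + pd, min b a + min c a + pm)]) b c
        ((b - a) + (c - a)) (min b a + min c a)
      simp only [List.foldl_cons]
      have hstep : lcStep (ders, [(b, 0, 0), (a, b - a, min b a)], pd, pm) c =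
          (ders ++ [(a, (b - a) + (c - a) + pd, min b a + min c a + pm)],
           [(c, 0, 0), (b, c - b, min c b)], (b - a) + (c - a), min b a + min c a) := by
        simp [lcStep, PySem.List.enumerate]
      rw [hstep]
      simp only [chainFull]
      simp at h ⊢
      rw [h]

lemma A_char (a b : Int) (rest : List Int) :
    lateral_comp (a :: b :: rest) = chainFull a b 0 0 rest := by
  have h := A_loop rest [] a b 0 0
  simp only [lateral_comp, List.foldl_cons]
  have h1 : lcStep (([] : List (Int × Int × Int)), ([] : List (Int × Int × Int)), (0:Int), (0:Int)) a
      = ([], [(a, 0, 0)], 0, 0) := by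
    simp [lcStep, PySem.List.enumerate]
  have h2 : lcStep (([] : List (Int × Int × Int)), [(a, (0:Int), (0:Int))], (0:Int), (0:Int)) b
      = ([], [(b, 0, 0), (a, b - a, min b a)], 0, 0) := by
    simp [lcStep, PySem.List.enumerate]
  rw [h1, h2]
  simpa using h

-- adds the carry to the head tuple when (and only when) the head is a completed "body" tuple
def bumpH (pd pm : Int) : List (Int × Int × Int) → List (Int × Int × Int)
  | x :: t => if 2 ≤ t.length then (x.1, x.2.1 + pd, x.2.2 + pm) :: t else x :: t
  | [] => []

lemma bumpH_zero (l : List (Int × Int × Int)) : bumpH 0 0 l = l := by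
  cases l with
  | nil => rfl
  | cons x t => simp [bumpH]

lemma length_chainFull (rest : List Int) : ∀ (a b pd pm : Int),
    (chainFull a b pd pm rest).length = rest.length + 2 := by
  induction rest with
  | nil => intro a b pd pm; simp [chainFull]
  | cons c r ih => intro a b pd pm; simp [chainFull, ih]

lemma B_shift (rest : List Int) (a b c : Int) :
    lateral_comp_alt (a :: b :: c :: rest) =
      (a, (b - a) + (c - a), min b a + min c a) ::
        bumpH ((b - a) + (c - a)) (min b a + min c a) (lateral_comp_alt (b :: c :: rest)) := by
  cases rest with
  | nil =>
      simp [lateral_comp_alt, bumpH, List.range_succ]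
  | cons e r =>
      simp only [lateral_comp_alt, List.length_cons]
      norm_num
      have h1 : r.length + 1 + 1 + 1 + 1 - 2 = r.length + 1 + 1 := by omega
      have h2 : r.length + 1 + 1 + 1 - 2 = r.length + 1 := by omega
      simp only [h1, h2]
      simp only [List.range_succ_eq_map, List.map_cons, List.map_map, List.cons_append]
      simp [bumpH, Function.comp, List.getElem?_cons_succ]

lemma B_char (rest : List Int) : ∀ (a b pd pm : Int),
    bumpH pd pm (lateral_comp_alt (a :: b :: rest)) = chainFull a b pd pm rest := by
  induction rest with
  | nil =>
      intro a b pd pm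
      simp [lateral_comp_alt, bumpH, chainFull]
  | cons c rest ih =>
      intro a b pd pm
      rw [B_shift, ih b c ((b - a) + (c - a)) (min b a + min c a), chainFull]
      have hL : 2 ≤ (chainFull b c ((b - a) + (c - a)) (min b a + min c a) rest).length := by
        rw [length_chainFull]; omega
      simp only [bumpH]
      rw [if_pos hL]

-- ===== VERDICT (by name: the statement is the Claim_ definition above) =====
theorem lateral_comp_spec : Claim_equal_lateral_comp := by
  intro pixel_ _
  unfold Spec_lateral_comp
  match pixel_ with
  | [] => simp [lateral_comp, lateral_comp_alt]
  | [a] => simp [lateral_comp, lateral_comp_alt, lcStep, PySem.List.enumerate]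
  | a :: b :: rest =>
      rw [A_char, ← B_char rest a b 0 0, bumpH_zero]
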